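-- pv_equiv track=rewrite | github.com/marl-Am/smart-log-file-analyzer | utils/analyzer.py | classify_user_agents
-- ===== SOURCE A (Python) =====
-- from collections import Counter, defaultdict
--
-- def classify_user_agents(logs):
--     bots = defaultdict(int)
--     browsers = defaultdict(int)
--     unknown = defaultdict(int)
--
--     for log in logs:
--         user_agent = log.get("user_agent", "").lower()
--
--         if "bot" in user_agent or "spider" in user_agent or "crawler" in user_agent:
--             bots[user_agent]+=1
--         elif "mozilla" in user_agent or "chrome" in user_agent or "safari" in user_agent:
--             browsers[user_agent]+=1
--         else:
--             unknown[user_agent]+=1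
--
--     return {
--         "bots": dict(bots),
--         "browsers": dict(browsers),
--         "unknown": dict(unknown)
--     }
-- ===== SOURCE B (Python) =====
-- def classify_user_agents(logs):
--     uas = [log.get("user_agent", "").lower() for log in logs]
--
--     def category(ua):
--         if "bot" in ua or "spider" in ua or "crawler" in ua:
--             return "bots"
--         if "mozilla" in ua or "chrome" in ua or "safari" in ua:
--             return "browsers"
--         return "unknown"
--
--     result = {}
--     for label in ("bots", "browsers", "unknown"):
--         selected = [ua for ua in uas if category(ua) == label]
--         result[label] = {ua: selected.count(ua) for ua in dict.fromkeys(selected)}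
--     return result
-- ===== Notes on version B (the rewrite author's own statement) =====
-- stated objective: alternative
-- what changed: B lowers all user agents once, then builds each of the three result dicts in its own staged pass -- filter the agents by a category function, dedup preserving first occurrence, and count each unique agent with list.count -- instead of A's single fold that increments one of three per-class defaultdicts per log.
import Mathlib
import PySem

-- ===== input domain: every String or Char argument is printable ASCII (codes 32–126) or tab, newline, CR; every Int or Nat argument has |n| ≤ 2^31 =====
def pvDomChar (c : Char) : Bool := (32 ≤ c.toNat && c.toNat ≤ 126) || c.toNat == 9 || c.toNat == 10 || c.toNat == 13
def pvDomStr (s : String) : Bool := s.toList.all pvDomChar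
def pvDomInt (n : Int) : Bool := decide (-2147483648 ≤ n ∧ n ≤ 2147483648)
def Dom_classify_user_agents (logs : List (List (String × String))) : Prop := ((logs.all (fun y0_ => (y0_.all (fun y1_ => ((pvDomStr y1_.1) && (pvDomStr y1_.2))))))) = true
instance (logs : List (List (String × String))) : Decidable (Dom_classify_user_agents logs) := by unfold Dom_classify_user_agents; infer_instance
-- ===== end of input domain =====

-- B extracts the lowered user agents once, then builds each of the three result dicts in
-- its own staged pass (filter by category, dedup, count), instead of A's single fold that
-- increments one of three defaultdicts per log.  Objective: alternative decomposition.

-- shared subexpressions of both Pythons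
def pvUA (log : List (String × String)) : String :=
  PySem.Str.lower ((PySem.Dict.mk log).getD "user_agent" "")

def pvIsBot (ua : String) : Bool :=
  PySem.Str.isIn "bot" ua || PySem.Str.isIn "spider" ua || PySem.Str.isIn "crawler" ua

def pvIsBrowser (ua : String) : Bool :=
  PySem.Str.isIn "mozilla" ua || PySem.Str.isIn "chrome" ua || PySem.Str.isIn "safari" ua

-- ===== PORT A =====
-- loop body of A: compute ua, then increment the matching defaultdict
def pvStepA (st : PySem.Dict String Int × PySem.Dict String Int × PySem.Dict String Int)
    (ua : String) : PySem.Dict String Int × PySem.Dict String Int × PySem.Dict String Int :=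
  if pvIsBot ua then (st.1.insert ua (st.1.getD ua 0 + 1), st.2.1, st.2.2)
  else if pvIsBrowser ua then (st.1, st.2.1.insert ua (st.2.1.getD ua 0 + 1), st.2.2)
  else (st.1, st.2.1, st.2.2.insert ua (st.2.2.getD ua 0 + 1))

def classify_user_agents (logs : List (List (String × String))) : List (String × List (String × Int)) :=
  let st := logs.foldl (fun st log => pvStepA st (pvUA log))
    (PySem.Dict.empty, PySem.Dict.empty, PySem.Dict.empty)
  [("bots", st.1.items), ("browsers", st.2.1.items), ("unknown", st.2.2.items)]

-- ===== PORT B =====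
-- Source B's category(ua)
def pvCategory (ua : String) : String :=
  if pvIsBot ua then "bots" else if pvIsBrowser ua then "browsers" else "unknown"

-- Source B's loop body: selected = [ua for ua in uas if category(ua)==label];
-- {ua: selected.count(ua) for ua in dict.fromkeys(selected)}
def pvGroup (uas : List String) (label : String) : List (String × Int) :=
  (PySem.Set.ofList (uas.filter (fun ua => pvCategory ua == label))).map
    (fun k => (k, ((uas.filter (fun ua => pvCategory ua == label)).count k : Int)))

def classify_user_agents_alt (logs : List (List (String × String))) : List (String × List (String × Int)) :=
  let uas := logs.map pvUA
  ["bots", "browsers", "unknown"].map (fun label => (label, pvGroup uas label))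

-- ===== PRECONDITION & SPEC =====
def Spec_classify_user_agents (logs : List (List (String × String))) (out : List (String × List (String × Int))) : Prop := out = classify_user_agents_alt logs
instance (logs : List (List (String × String))) (out : List (String × List (String × Int))) : Decidable (Spec_classify_user_agents logs out) := by unfold Spec_classify_user_agents; infer_instance

-- ===== CLAIM (what is proved, stated in full; the proofs are below) =====
def Claim_equal_classify_user_agents : Prop := ∀ (logs : List (List (String × String))), Dom_classify_user_agents logs → Spec_classify_user_agents logs (classify_user_agents logs)

-- ===== LEMMAS AND PROOFS =====

-- canonical form: for each class predicate p, the per-class dict's items are the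
-- first occurrences of the class's agents, each paired with its total count
def pvCanon (p : String → Bool) (us : List String) : List (String × Int) :=
  ((PySem.Set.ofList us).filter p).map (fun k => (k, (us.count k : Int)))

lemma pvOfList_append (us : List String) (x : String) :
    PySem.Set.ofList (us ++ [x]) = (PySem.Set.ofList us).add x := by
  simp [PySem.Set.ofList_eq_foldl, List.foldl_append]

lemma pvCanon_append_neg (p : String → Bool) (us : List String) (x : String)
    (h : p x = false) : pvCanon p (us ++ [x]) = pvCanon p us := by
  unfold pvCanon
  rw [pvOfList_append]
  have hfilter : ((PySem.Set.ofList us).add x).filter p = (PySem.Set.ofList us).filter p := by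
    unfold PySem.Set.add
    split
    · rfl
    · simp [List.filter_append, h]
  rw [hfilter]
  apply List.map_congr_left
  intro k hk
  have hpk : p k = true := List.of_mem_filter hk
  have hkx : k ≠ x := fun he => by rw [he, h] at hpk; exact Bool.false_ne_true hpk
  have hkx' : ¬ x = k := fun he => hkx he.symm
  simp [List.count_append, hkx']

lemma pvCanon_step_pos (p : String → Bool) (us : List String) (x : String)
    (d : PySem.Dict String Int) (hd : d.items = pvCanon p us)
    (h : p x = true) :
    (d.insert x (d.getD x 0 + 1)).items = pvCanon p (us ++ [x]) := by
  have hkeys : d.keys = (PySem.Set.ofList us).filter p := by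
    simp only [PySem.Dict.keys, hd, pvCanon, List.map_map, Function.comp_def]
    exact List.map_id _
  have hnodupk : d.keys.Nodup := by
    rw [hkeys]; exact (PySem.Set.nodup_ofList us).filter _
  by_cases hx : x ∈ us
  · -- x already seen: overwrite in place
    have hxs : x ∈ PySem.Set.ofList us := (PySem.Set.mem_ofList _ _).2 hx
    have hxk : x ∈ d.keys := by rw [hkeys]; exact List.mem_filter.2 ⟨hxs, h⟩
    have hcont : d.contains x = true := (PySem.Dict.contains_iff_mem_keys _ _).2 hxk
    have hmemitems : (x, (us.count x : Int)) ∈ d.items := by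
      rw [hd]; exact List.mem_map_of_mem (List.mem_filter.2 ⟨hxs, h⟩)
    have hget : d.get? x = some (us.count x : Int) :=
      PySem.Dict.get?_of_mem_items _ hmemitems hnodupk
    have hgetD : d.getD x 0 = (us.count x : Int) := by
      simp [PySem.Dict.getD_eq_get?_getD, hget]
    have hadd : (PySem.Set.ofList us).add x = PySem.Set.ofList us := by
      unfold PySem.Set.add
      simp [hx]
    rw [PySem.Dict.items_insert_of_contains _ _ hcont, hd, hgetD]
    unfold pvCanon
    rw [pvOfList_append, hadd, List.map_map]
    apply List.map_congr_left
    intro k hk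
    by_cases hkx : k = x
    · subst hkx; simp [Function.comp, List.count_append]
    · simp [Function.comp, hkx, List.count_append, Ne.symm hkx]
  · -- fresh key: append
    have hxs : x ∉ PySem.Set.ofList us := fun hc => hx ((PySem.Set.mem_ofList _ _).1 hc)
    have hxk : x ∉ d.keys := by rw [hkeys]; exact fun hc => hxs (List.mem_filter.1 hc).1
    have hcont : d.contains x = false := by
      rw [PySem.Dict.contains_eq_decide_mem_keys]; simpa using hxk
    have hgetD : d.getD x 0 = 0 := PySem.Dict.getD_of_not_contains _ _ hcont
    have hadd : (PySem.Set.ofList us).add x = PySem.Set.ofList us ++ [x] := by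
      unfold PySem.Set.add
      simp [hx]
    rw [PySem.Dict.items_insert_of_not_contains _ _ hcont, hd, hgetD]
    unfold pvCanon
    rw [pvOfList_append, hadd, List.filter_append, List.map_append]
    congr 1
    · apply List.map_congr_left
      intro k hk
      have hkus : k ∈ us := (PySem.Set.mem_ofList _ _).1 (List.mem_filter.1 hk).1
      have hkx : ¬ x = k := fun he => hx (he ▸ hkus)
      simp [List.count_append, hkx]
    · have hcx : us.count x = 0 := List.count_eq_zero.2 (by simpa using hx)
      simp [h, List.count_append, List.count_singleton, hcx]

-- A side: the fold's three dicts are the canonical per-class dicts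
lemma pvFoldA_items (us : List String) :
    (us.foldl pvStepA (PySem.Dict.empty, PySem.Dict.empty, PySem.Dict.empty)).1.items = pvCanon pvIsBot us
    ∧ (us.foldl pvStepA (PySem.Dict.empty, PySem.Dict.empty, PySem.Dict.empty)).2.1.items = pvCanon (fun y => !pvIsBot y && pvIsBrowser y) us
    ∧ (us.foldl pvStepA (PySem.Dict.empty, PySem.Dict.empty, PySem.Dict.empty)).2.2.items = pvCanon (fun y => !pvIsBot y && !pvIsBrowser y) us := by
  induction us using List.reverseRecOn with
  | nil => exact ⟨rfl, rfl, rfl⟩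
  | append_singleton us x ih =>
    obtain ⟨i1, i2, i3⟩ := ih
    rw [List.foldl_append, List.foldl_cons, List.foldl_nil]
    generalize hst : List.foldl pvStepA (PySem.Dict.empty, PySem.Dict.empty, PySem.Dict.empty) us = st at i1 i2 i3 ⊢
    simp only [pvStepA]
    split_ifs with h1 h2
    · exact ⟨pvCanon_step_pos _ _ _ _ i1 h1,
        by rw [i2, pvCanon_append_neg _ _ _ (by simp [h1])],
        by rw [i3, pvCanon_append_neg _ _ _ (by simp [h1])]⟩
    · exact ⟨by rw [i1, pvCanon_append_neg _ _ _ (by simpa using h1)],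
        pvCanon_step_pos _ _ _ _ i2 (by simp [h1, h2]),
        by rw [i3, pvCanon_append_neg _ _ _ (by simp [h2])]⟩
    · exact ⟨by rw [i1, pvCanon_append_neg _ _ _ (by simpa using h1)],
        by rw [i2, pvCanon_append_neg _ _ _ (by simp [h2])],
        pvCanon_step_pos _ _ _ _ i3 (by simp [h1, h2])⟩

-- dedup commutes with filter
lemma pvOfList_filter (p : String → Bool) (us : List String) :
    PySem.Set.ofList (us.filter p) = (PySem.Set.ofList us).filter p := by
  induction us using List.reverseRecOn with
  | nil => rfl
  | append_singleton us x ih =>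
    by_cases hp : p x = true
    · rw [show (us ++ [x]).filter p = us.filter p ++ [x] by simp [List.filter_append, hp],
        pvOfList_append, pvOfList_append, ih]
      by_cases hx : x ∈ us
      · have h2 : x ∈ PySem.Set.ofList us := (PySem.Set.mem_ofList _ _).2 hx
        have h1 : x ∈ (PySem.Set.ofList us).filter p :=
          List.mem_filter.2 ⟨h2, hp⟩
        simp [PySem.Set.add, PySem.Set.contains, h1, h2]
      · have h2 : x ∉ PySem.Set.ofList us := by simp [PySem.Set.mem_ofList, hx]
        have h1 : x ∉ (PySem.Set.ofList us).filter p := fun h => h2 (List.mem_filter.1 h).1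
        simp [PySem.Set.add, PySem.Set.contains, h1, h2, List.filter_append, hp]
    · have hp' : p x = false := by simpa using hp
      rw [show (us ++ [x]).filter p = us.filter p by simp [List.filter_append, hp'],
        ih, pvOfList_append]
      by_cases hx : x ∈ PySem.Set.ofList us
      · simp [PySem.Set.add, PySem.Set.contains, hx]
      · simp [PySem.Set.add, PySem.Set.contains, hx, List.filter_append, hp']

-- B's per-label pass equals the canonical per-class dict
lemma pvGroup_eq_canon (uas : List String) (label : String) (p : String → Bool)
    (hp : ∀ ua, (pvCategory ua == label) = p ua) :
    pvGroup uas label = pvCanon p uas := by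
  unfold pvGroup pvCanon
  have hf : uas.filter (fun ua => pvCategory ua == label) = uas.filter p :=
    List.filter_congr (fun x _ => hp x)
  rw [hf, pvOfList_filter]
  apply List.map_congr_left
  intro k hk
  have hpk : p k = true := List.of_mem_filter hk
  rw [List.count_filter]
  simp [hpk]

lemma pvCat_bots (ua : String) : (pvCategory ua == "bots") = pvIsBot ua := by
  unfold pvCategory; split_ifs with h1 h2 <;> simp [*]

lemma pvCat_browsers (ua : String) :
    (pvCategory ua == "browsers") = (!pvIsBot ua && pvIsBrowser ua) := by
  unfold pvCategory; split_ifs with h1 h2 <;> simp [*]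

lemma pvCat_unknown (ua : String) :
    (pvCategory ua == "unknown") = (!pvIsBot ua && !pvIsBrowser ua) := by
  unfold pvCategory; split_ifs with h1 h2 <;> simp [*]

-- ===== VERDICT (by name: the statement is the Claim_ definition above) =====
theorem classify_user_agents_spec : Claim_equal_classify_user_agents := by
  intro logs _
  unfold Spec_classify_user_agents classify_user_agents classify_user_agents_alt
  obtain ⟨a1, a2, a3⟩ := pvFoldA_items (logs.map pvUA)
  rw [List.foldl_map] at a1 a2 a3
  simp only [List.map_cons, List.map_nil]
  rw [pvGroup_eq_canon _ _ _ pvCat_bots, pvGroup_eq_canon _ _ _ pvCat_browsers,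
    pvGroup_eq_canon _ _ _ pvCat_unknown]
  simp only [a1, a2, a3]
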